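-- pv_equiv track=rewrite | github.com/StrikerEureka27/python-knowledge | day-05.py | expensive_coffe
-- ===== SOURCE A (Python) =====
-- def expensive_coffe(coffe_prices):
--     prices  = [price for coffe, price in coffe_prices]
--     exp_coffe = max(prices)
--     for coffe, price in coffe_prices:
--         if price == exp_coffe:
--             return (coffe, price)
--         else:
--             pass
-- ===== SOURCE B (Python) =====
-- def expensive_coffe(coffe_prices):
--     c, p = max(coffe_prices, key=lambda x: x[1])
--     return (c, p)
-- ===== Notes on version B (the rewrite author's own statement) =====
-- stated objective: idiomatic
-- what changed: One keyed max over the pairs replaces A's three passes (build a prices list, max over it, rescan for the first matching pair); Python's max with a key keeps the first maximal element, matching A's first-match rescan.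
import Mathlib
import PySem

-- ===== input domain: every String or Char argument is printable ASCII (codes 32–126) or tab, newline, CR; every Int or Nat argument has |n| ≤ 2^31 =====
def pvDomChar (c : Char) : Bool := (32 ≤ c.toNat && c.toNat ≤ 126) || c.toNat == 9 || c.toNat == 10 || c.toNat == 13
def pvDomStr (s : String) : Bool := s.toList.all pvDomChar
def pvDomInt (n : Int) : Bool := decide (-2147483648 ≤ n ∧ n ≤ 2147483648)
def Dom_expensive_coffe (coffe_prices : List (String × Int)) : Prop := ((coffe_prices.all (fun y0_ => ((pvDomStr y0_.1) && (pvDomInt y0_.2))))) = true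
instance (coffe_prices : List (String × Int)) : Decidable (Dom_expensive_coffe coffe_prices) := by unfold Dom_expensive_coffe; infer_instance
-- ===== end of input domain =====

-- B replaces A's three passes (price list, max, rescan) with one keyed max; idiomatic, same O(n).

-- ===== PORT A =====
-- A's for-loop: return the first pair whose price equals exp (none = loop falls through, unreachable under Pre_).
def pvAScan (coffe_prices : List (String × Int)) (exp : Int) : Option (String × Int) :=
  match coffe_prices with
  | [] => none
  | (c, p) :: t => if p == exp then some (c, p) else pvAScan t exp

def expensive_coffe (coffe_prices : List (String × Int)) : String × Int :=
  let prices := coffe_prices.map (fun y => y.2)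
  match PySem.List.max? prices (fun x => x) with
  | none => ("", 0)          -- Python: max([]) raises ValueError; excluded by Pre_
  | some exp => (pvAScan coffe_prices exp).getD ("", 0)  -- loop fall-through: unreachable, exp ∈ prices

-- ===== PORT B =====
def expensive_coffe_alt (coffe_prices : List (String × Int)) : String × Int :=
  match PySem.List.max? coffe_prices (fun x => x.2) with
  | none => ("", 0)          -- Python: max([]) raises ValueError; excluded by Pre_
  | some (c, p) => (c, p)

-- ===== PRECONDITION & SPEC =====
-- Pre_ excludes only the empty list, on which Python's max raises ValueError (both in A and in B).
def Pre_expensive_coffe (coffe_prices : List (String × Int)) : Prop := coffe_prices ≠ []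
instance (coffe_prices : List (String × Int)) : Decidable (Pre_expensive_coffe coffe_prices) := by unfold Pre_expensive_coffe; infer_instance
def pvWitness_expensive_coffe : (List (String × Int)) := [("latte", 5), ("mocha", 7), ("flat", 7)]

def Spec_expensive_coffe (coffe_prices : List (String × Int)) (out : String × Int) : Prop := out = expensive_coffe_alt coffe_prices
instance (coffe_prices : List (String × Int)) (out : String × Int) : Decidable (Spec_expensive_coffe coffe_prices out) := by unfold Spec_expensive_coffe; infer_instance

-- ===== CLAIM (what is proved, stated in full; the proofs are below) =====
def Claim_equal_expensive_coffe : Prop := ∀ (coffe_prices : List (String × Int)), Dom_expensive_coffe coffe_prices → Pre_expensive_coffe coffe_prices → Spec_expensive_coffe coffe_prices (expensive_coffe coffe_prices)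

-- ===== LEMMAS AND PROOFS =====

-- Structural form of B's fold started from an accumulator.
def pvBFrom (a : String × Int) : List (String × Int) → String × Int
  | [] => a
  | x :: t => pvBFrom (if a.2 < x.2 then x else a) t

theorem pvMaxAlt (t : List (String × Int)) (a : String × Int) :
    PySem.List.max? (a :: t) (fun x => x.2) = some (pvBFrom a t) := by
  induction t generalizing a with
  | nil => simp [PySem.List.max?, pvBFrom]
  | cons x s ih =>
    have h1 : PySem.List.max? (a :: x :: s) (fun y : String × Int => y.2)
        = PySem.List.max? ((if a.2 < x.2 then x else a) :: s) (fun y => y.2) := by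
      simp only [PySem.List.max?, List.foldl]
      by_cases h : a.2 < x.2 <;> simp [h]
    rw [h1, ih, pvBFrom]

-- a is never replaced in B's fold when nothing in s is strictly more expensive
theorem pvBFrom_stay (s : List (String × Int)) (a : String × Int)
    (h : ∀ x ∈ s, x.2 ≤ a.2) : pvBFrom a s = a := by
  induction s with
  | nil => rfl
  | cons x s ih =>
    have hx : ¬ a.2 < x.2 := not_lt.mpr (h x (List.mem_cons_self ..))
    simp only [pvBFrom, if_neg hx]
    exact ih (fun y hy => h y (List.mem_cons_of_mem _ hy))

theorem pvLeFoldMax (t : List (String × Int)) (a : Int) :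
    a ≤ (t.map (fun y => y.2)).foldl max a ∧
      ∀ x ∈ t, x.2 ≤ (t.map (fun y => y.2)).foldl max a := by
  have h := PySem.List.le_foldl_max (t.map (fun y => y.2)) a
  refine ⟨h.1, fun x hx => h.2 x.2 (List.mem_map_of_mem hx)⟩

-- Core: A's rescan with exp = the running max equals B's single-pass best.
theorem pvMain (t : List (String × Int)) (a : String × Int) :
    pvAScan (a :: t) ((t.map (fun y => y.2)).foldl max a.2) = some (pvBFrom a t) := by
  induction t generalizing a with
  | nil => simp [pvAScan, pvBFrom]
  | cons x s ih =>
    simp only [List.map, List.foldl, pvBFrom]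
    by_cases h : a.2 < x.2
    · -- a is replaced; a.2 < M so the first test fails
      have hmax : max a.2 x.2 = x.2 := max_eq_right h.le
      have hM : x.2 ≤ (s.map (fun y => y.2)).foldl max (max a.2 x.2) := by
        rw [hmax]; exact (pvLeFoldMax s x.2).1
      have hne : ¬ (a.2 == (s.map (fun y => y.2)).foldl max (max a.2 x.2)) := by
        simp only [beq_iff_eq]
        intro hEq; omega
      simp only [pvAScan, hne, if_false, if_pos h]
      have := ih x
      rw [hmax]
      exact this
    · -- a survives; max a.2 x.2 = a.2
      have hmax : max a.2 x.2 = a.2 := max_eq_left (le_of_not_gt h)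
      rw [hmax, if_neg h]
      have hIH := ih a
      by_cases he : a.2 = (s.map (fun y => y.2)).foldl max a.2
      · have hstay : pvBFrom a s = a := by
          refine pvBFrom_stay s a (fun y hy => ?_)
          have := (pvLeFoldMax s a.2).2 y hy
          omega
        simp [pvAScan, he.symm, hstay]
      · have hlt : a.2 < (s.map (fun y => y.2)).foldl max a.2 :=
          lt_of_le_of_ne (pvLeFoldMax s a.2).1 he
        have hx : ¬ (x.2 == (s.map (fun y => y.2)).foldl max a.2) := by
          simp only [beq_iff_eq]
          intro hEq
          have : x.2 ≤ a.2 := le_of_not_gt h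
          omega
        have ha : ¬ (a.2 == (s.map (fun y => y.2)).foldl max a.2) := by
          simp only [beq_iff_eq]; exact he
        -- unfold the scans: both skip down to pvAScan s
        have hA : pvAScan (a :: x :: s) ((s.map (fun y => y.2)).foldl max a.2)
            = pvAScan s ((s.map (fun y => y.2)).foldl max a.2) := by
          simp [pvAScan, ha, hx]
        have hA' : pvAScan (a :: s) ((s.map (fun y => y.2)).foldl max a.2)
            = pvAScan s ((s.map (fun y => y.2)).foldl max a.2) := by
          simp [pvAScan, ha]
        rw [hA, ← hA', hIH]

-- ===== VERDICT (by name: the statement is the Claim_ definition above) =====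
theorem expensive_coffe_spec : Claim_equal_expensive_coffe := by
  intro cps _hDom hPre
  unfold Spec_expensive_coffe expensive_coffe expensive_coffe_alt
  match cps with
  | [] => exact absurd rfl hPre
  | a :: t =>
    simp only [List.map]
    rw [PySem.List.max?_id_cons, pvMaxAlt]
    simp [pvMain t a]
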